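-- pv_equiv track=rewrite | github.com/Ankan002/ymca-it-3rd-sem | assignment-01/problem-07/get-sum-or-product.py | get_sum_or_product
-- ===== SOURCE A (Python) =====
-- def get_sum_or_product(num: int) -> int:
--     num = abs(num)
--     if num % 2 == 0:
--         sum = 0
--         while num > 0:
--             sum += num % 10
--             num //= 10
--
--         return sum
--
--     product = 1
--
--     while num > 0:
--         product *= num % 10
--         num //= 10
--
--     return product
-- ===== SOURCE B (Python) =====
-- def get_sum_or_product(num: int) -> int:
--     digits = [int(c) for c in str(abs(num))]
--     if num % 2 == 0:
--         return sum(digits)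
--     product = 1
--     for d in digits:
--         product *= d
--     return product
-- ===== Notes on version B (the rewrite author's own statement) =====
-- stated objective: idiomatic
-- what changed: Replaces the two arithmetic mod/div while-loops with a single string-based digit extraction (most-significant-first) followed by a library sum or a product fold.
import Mathlib
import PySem

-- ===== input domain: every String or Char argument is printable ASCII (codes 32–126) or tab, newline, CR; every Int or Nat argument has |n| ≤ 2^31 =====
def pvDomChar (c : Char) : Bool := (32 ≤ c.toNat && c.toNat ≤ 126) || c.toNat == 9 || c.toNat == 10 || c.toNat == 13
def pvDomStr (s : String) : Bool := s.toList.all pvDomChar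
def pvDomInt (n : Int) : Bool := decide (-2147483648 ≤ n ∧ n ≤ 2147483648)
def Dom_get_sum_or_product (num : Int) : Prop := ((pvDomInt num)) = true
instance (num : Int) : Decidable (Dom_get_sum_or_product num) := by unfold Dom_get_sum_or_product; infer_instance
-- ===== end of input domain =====

-- B replaces A's two arithmetic mod/div while-loops by one string-based digit extraction
-- (most-significant digit first) plus a library sum / a product fold (objective: idiomatic).

-- ===== PORT A =====
-- A's first while loop: `while num > 0: sum += num % 10; num //= 10`.
-- After `num = abs(num)` the value is nonnegative, so it is tracked as a Nat and
-- Python's `%`/`//` coincide with Nat `%`/`/` (exact on nonnegative operands).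
def pvSumLoop (s : Int) (n : Nat) : Int :=
  if h : n > 0 then pvSumLoop (s + (n % 10 : Nat)) (n / 10) else s
  decreasing_by exact Nat.div_lt_self h (by norm_num)

-- A's second while loop: `while num > 0: product *= num % 10; num //= 10`.
def pvProdLoop (p : Int) (n : Nat) : Int :=
  if h : n > 0 then pvProdLoop (p * (n % 10 : Nat)) (n / 10) else p
  decreasing_by exact Nat.div_lt_self h (by norm_num)

def get_sum_or_product (num : Int) : Int :=
  let n : Nat := num.natAbs          -- num = abs(num)
  if n % 2 = 0 then pvSumLoop 0 n    -- sum = 0; while-loop; return sum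
  else pvProdLoop 1 n                -- product = 1; while-loop; return product

-- ===== PORT B =====
-- `int(c)` for the decimal digit characters produced by `str(abs(num))`:
-- exact on '0'..'9' (the only characters that string contains).
def pvDigitVal (c : Char) : Int := (c.toNat : Int) - 48

def get_sum_or_product_alt (num : Int) : Int :=
  let digits : List Int := (PySem.Int.toChars |num|).map pvDigitVal  -- [int(c) for c in str(abs(num))]
  if PySem.Int.mod num 2 = 0 then digits.sum                         -- return sum(digits)
  else digits.foldl (fun p d => p * d) 1                             -- product = 1; for d in digits: product *= d

-- ===== PRECONDITION & SPEC =====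
def Spec_get_sum_or_product (num : Int) (out : Int) : Prop := out = get_sum_or_product_alt num
instance (num : Int) (out : Int) : Decidable (Spec_get_sum_or_product num out) := by unfold Spec_get_sum_or_product; infer_instance

-- ===== CLAIM (what is proved, stated in full; the proofs are below) =====
def Claim_equal_get_sum_or_product : Prop := ∀ (num : Int), Dom_get_sum_or_product num → Spec_get_sum_or_product num (get_sum_or_product num)

-- ===== LEMMAS AND PROOFS =====

-- mapping a digit character back to its value
theorem pvDigitVal_digitChar (d : Nat) (h : d < 10) : pvDigitVal (Nat.digitChar d) = (d : Int) := by
  interval_cases d <;> decide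

theorem pvToDigitsCore_eq (f : Nat) : ∀ (n : Nat) (acc : List Char), 0 < n → n < f →
    Nat.toDigitsCore 10 f n acc = ((Nat.digits 10 n).map Nat.digitChar).reverse ++ acc := by
  induction f with
  | zero => intro n acc h hf; omega
  | succ f ih =>
    intro n acc h hf
    rw [Nat.toDigitsCore]
    rw [Nat.digits_def' (by norm_num : 1 < 10) h]
    by_cases h10 : n / 10 = 0
    · simp [h10]
    · have hlt : n / 10 < f := by
        have := Nat.div_lt_self h (by norm_num : 1 < 10)
        omega
      rw [if_neg h10, ih (n / 10) _ (Nat.pos_of_ne_zero h10) hlt]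
      simp

theorem pvToDigits_eq (n : Nat) (h : 0 < n) :
    Nat.toDigits 10 n = ((Nat.digits 10 n).map Nat.digitChar).reverse := by
  rw [Nat.toDigits, pvToDigitsCore_eq (n + 1) n [] h (by omega), List.append_nil]

theorem pvSumLoop_eq (n : Nat) : ∀ (s : Int),
    pvSumLoop s n = s + ((Nat.digits 10 n).map (fun d : Nat => (d : Int))).sum := by
  induction n using Nat.strong_induction_on with
  | _ n ih =>
    intro s
    rw [pvSumLoop]
    by_cases h : n > 0
    · rw [dif_pos h, ih (n / 10) (Nat.div_lt_self h (by norm_num)),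
        Nat.digits_def' (by norm_num : 1 < 10) h]
      simp; ring
    · have : n = 0 := by omega
      subst this; simp

theorem pvProdLoop_eq (n : Nat) : ∀ (p : Int),
    pvProdLoop p n = p * ((Nat.digits 10 n).map (fun d : Nat => (d : Int))).prod := by
  induction n using Nat.strong_induction_on with
  | _ n ih =>
    intro p
    rw [pvProdLoop]
    by_cases h : n > 0
    · rw [dif_pos h, ih (n / 10) (Nat.div_lt_self h (by norm_num)),
        Nat.digits_def' (by norm_num : 1 < 10) h]
      simp; ring
    · have : n = 0 := by omega
      subst this; simp

-- B's digit list is the (MSB-first) reverse of A's digit sequence, as integers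
theorem pvDigits_alt (n : Nat) (h : 0 < n) :
    (PySem.Int.toChars (n : Int)).map pvDigitVal
      = ((Nat.digits 10 n).map (fun d : Nat => (d : Int))).reverse := by
  rw [PySem.Int.toChars, if_neg (by omega), Int.toNat_natCast,
    pvToDigits_eq n h, List.map_reverse, List.map_map]
  refine congrArg List.reverse (List.map_congr_left ?_)
  intro d hd
  exact pvDigitVal_digitChar d (Nat.digits_lt_base (by norm_num) hd)

theorem pvMod2 (num : Int) : (PySem.Int.mod num 2 = 0) ↔ (num.natAbs % 2 = 0) := by
  rw [PySem.Int.mod, Int.fmod_eq_emod_of_nonneg _ (by norm_num)]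
  omega

-- ===== VERDICT (by name: the statement is the Claim_ definition above) =====
theorem get_sum_or_product_spec : Claim_equal_get_sum_or_product := by
  intro num _
  unfold Spec_get_sum_or_product get_sum_or_product get_sum_or_product_alt
  by_cases hp : num.natAbs % 2 = 0
  · rw [if_pos hp, if_pos ((pvMod2 num).mpr hp)]
    by_cases hz : num.natAbs = 0
    · have : num = 0 := by omega
      subst this
      rw [pvSumLoop]
      norm_num [PySem.Int.toChars, pvDigitVal, Nat.toDigits, Nat.toDigitsCore]
      decide
    · have hpos : 0 < num.natAbs := Nat.pos_of_ne_zero hz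
      have habs : |num| = ((num.natAbs : Int)) := Int.abs_eq_natAbs num
      rw [pvSumLoop_eq, habs, pvDigits_alt num.natAbs hpos, List.sum_reverse, zero_add]
  · rw [if_neg hp, if_neg (fun h => hp ((pvMod2 num).mp h))]
    have hpos : 0 < num.natAbs := by
      rcases Nat.eq_zero_or_pos num.natAbs with h | h
      · exact absurd (by omega : num.natAbs % 2 = 0) hp
      · exact h
    have habs : |num| = ((num.natAbs : Int)) := Int.abs_eq_natAbs num
    rw [pvProdLoop_eq, habs, pvDigits_alt num.natAbs hpos, one_mul]
    rw [← List.prod_eq_foldl, List.prod_reverse]
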